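-- pv_equiv track=rewrite | github.com/OxQuasar/nous-memories | iching/eastwest/dynamics_probe.py | enumerate_comp_surjections
-- ===== SOURCE A (Python) =====
-- from itertools import product as iprod
--
-- def complement(x, n):
--     return x ^ ((1 << n) - 1)
--
-- def get_complement_pairs(n):
--     pairs, seen = [], set()
--     for x in range(1 << n):
--         if x not in seen:
--             cx = complement(x, n)
--             seen.add(x); seen.add(cx)
--             pairs.append((min(x, cx), max(x, cx)))
--     return sorted(pairs)
--
-- def enumerate_comp_surjections(n, p):
--     """Complement-equivariant surjections F₂ⁿ → Z_p, as rep-value tuples."""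
--     pairs = get_complement_pairs(n)
--     R = len(pairs)
--     surjections = []
--     for vals in iprod(range(p), repeat=R):
--         image = set()
--         for v in vals:
--             image.add(v)
--             image.add((-v) % p)
--         if len(image) == p:
--             surjections.append(vals)
--     return surjections
-- ===== SOURCE B (Python) =====
-- def complement(x, n):
--     return x ^ ((1 << n) - 1)
--
-- def get_complement_pairs(n):
--     pairs, seen = [], set()
--     for x in range(1 << n):
--         if x not in seen:
--             cx = complement(x, n)
--             seen.add(x); seen.add(cx)
--             pairs.append((min(x, cx), max(x, cx)))
--     return sorted(pairs)
--
-- def enumerate_comp_surjections(n, p):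
--     """Complement-equivariant surjections F₂ⁿ → Z_p, as rep-value tuples (DFS)."""
--     R = len(get_complement_pairs(n))
--     out = []
--     def dfs(remaining, covered, prefix):
--         if remaining == 0:
--             if len(covered) == p:
--                 out.append(tuple(prefix))
--             return
--         for v in range(p):
--             dfs(remaining - 1, covered | {v, (-v) % p}, prefix + [v])
--     dfs(R, set(), [])
--     return out
-- ===== Notes on version B (the rewrite author's own statement) =====
-- stated objective: alternative
-- what changed: The flat itertools.product-over-all-R-tuples followed by recomputing the whole coverage set for each candidate is replaced by a recursive DFS over the R positions that carries the covered set and the partial tuple incrementally, emitting a tuple at the leaves when coverage is complete.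
import Mathlib
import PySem

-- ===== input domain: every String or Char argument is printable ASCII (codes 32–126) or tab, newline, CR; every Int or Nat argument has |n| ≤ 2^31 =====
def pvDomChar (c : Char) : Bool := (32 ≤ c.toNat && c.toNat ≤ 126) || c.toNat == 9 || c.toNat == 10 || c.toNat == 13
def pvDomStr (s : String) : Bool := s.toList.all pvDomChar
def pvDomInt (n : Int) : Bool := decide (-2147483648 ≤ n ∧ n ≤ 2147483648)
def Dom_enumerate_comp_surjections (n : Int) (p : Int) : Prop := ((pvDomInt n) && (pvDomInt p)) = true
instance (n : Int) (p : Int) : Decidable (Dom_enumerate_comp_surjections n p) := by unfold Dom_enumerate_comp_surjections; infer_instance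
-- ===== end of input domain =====

-- B replaces the flat product-then-filter enumeration by a DFS over the pair positions that
-- carries the covered set and the partial tuple incrementally (objective: alternative).

-- ===== PORT A =====
-- module helper: complement(x, n) = x ^ ((1 << n) - 1)  (1 << n written as (1:Int) <<< n.toNat; exact for n ≥ 0, i.e. under Pre_)
def pyComplement (x : Int) (n : Int) : Int :=
  PySem.Int.bxor x (((1 : Int) <<< n.toNat) - 1)

-- module helper: get_complement_pairs(n)  (sorted(pairs) of 2-tuples = PySem.List.sorted2 on both components)
def pyGetComplementPairs (n : Int) : List (Int × Int) :=
  let st := (PySem.List.pyRange 0 ((1 : Int) <<< n.toNat) 1).foldl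
    (fun (st : List (Int × Int) × PySem.Set Int) x =>
      if st.2.contains x then st
      else
        let cx := pyComplement x n
        (st.1 ++ [(min x cx, max x cx)], (st.2.add x).add cx))
    ([], PySem.Set.empty)
  PySem.List.sorted2 st.1 (fun pr => pr.1) (fun pr => pr.2) false

-- itertools.product(range(p), repeat=R), lexicographic (leftmost position varies slowest)
def prodRepeat (p : Int) : Nat → List (List Int)
  | 0 => [[]]
  | r + 1 => (PySem.List.pyRange 0 p 1).flatMap (fun v => (prodRepeat p r).map (fun t => v :: t))

def enumerate_comp_surjections (n : Int) (p : Int) : List (List Int) :=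
  let pairs := pyGetComplementPairs n
  let R := pairs.length
  (prodRepeat p R).foldl
    (fun surjections vals =>
      let image := vals.foldl (fun s v => (PySem.Set.add s v).add (PySem.Int.mod (-v) p)) PySem.Set.empty
      if PySem.Set.len image = p then surjections ++ [vals] else surjections)
    []

-- ===== PORT B =====
-- dfs(remaining, covered, pre): at the leaf emit the assembled tuple iff covered = Z_p;
-- otherwise try each v, extending covered by {v, (-v) % p} and pre by v.
def dfsCover (p : Int) : Nat → PySem.Set Int → List Int → List (List Int)
  | 0, covered, pre => if PySem.Set.len covered = p then [pre] else []
  | d + 1, covered, pre =>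
      (PySem.List.pyRange 0 p 1).foldl
        (fun out v =>
          out ++ dfsCover p d ((PySem.Set.add covered v).add (PySem.Int.mod (-v) p)) (pre ++ [v]))
        []

def enumerate_comp_surjections_alt (n : Int) (p : Int) : List (List Int) :=
  let R := (pyGetComplementPairs n).length
  dfsCover p R PySem.Set.empty []

-- ===== PRECONDITION & SPEC =====
-- Pre_ excludes n < 0, where Python A raises ValueError ('negative shift count' in 1 << n).
def Pre_enumerate_comp_surjections (n : Int) (p : Int) : Prop := 0 ≤ n
instance (n : Int) (p : Int) : Decidable (Pre_enumerate_comp_surjections n p) := by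
  unfold Pre_enumerate_comp_surjections; infer_instance

def pvWitness_enumerate_comp_surjections : Int × Int := (1, 2)

def Spec_enumerate_comp_surjections (n : Int) (p : Int) (out : List (List Int)) : Prop := out = enumerate_comp_surjections_alt n p
instance (n : Int) (p : Int) (out : List (List Int)) : Decidable (Spec_enumerate_comp_surjections n p out) := by unfold Spec_enumerate_comp_surjections; infer_instance

-- ===== CLAIM (what is proved, stated in full; the proofs are below) =====
def Claim_equal_enumerate_comp_surjections : Prop := ∀ (n : Int) (p : Int), Dom_enumerate_comp_surjections n p → Pre_enumerate_comp_surjections n p → Spec_enumerate_comp_surjections n p (enumerate_comp_surjections n p)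

-- ===== LEMMAS AND PROOFS =====

/-- The coverage fold both programs perform over a value list. -/
def coverFold (p : Int) (covered : PySem.Set Int) (vs : List Int) : PySem.Set Int :=
  vs.foldl (fun s v => (PySem.Set.add s v).add (PySem.Int.mod (-v) p)) covered

/-- The DFS emits exactly the product tuples whose total coverage is `p`, each preed. -/
theorem dfsCover_eq (p : Int) :
    ∀ (d : Nat) (covered : PySem.Set Int) (pre : List Int),
      dfsCover p d covered pre =
        ((prodRepeat p d).filter
            (fun vs => decide (PySem.Set.len (coverFold p covered vs) = p))).map
          (fun vs => pre ++ vs) := by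
  intro d
  induction d with
  | zero =>
      intro covered pre
      simp [dfsCover, prodRepeat, coverFold]
      split <;> simp_all
  | succ d ih =>
      intro covered pre
      show (PySem.List.pyRange 0 p 1).foldl
          (fun out v =>
            out ++ dfsCover p d ((PySem.Set.add covered v).add (PySem.Int.mod (-v) p)) (pre ++ [v])) []
        = _
      rw [PySem.List.foldl_append_eq_flatMap]
      simp only [prodRepeat, List.filter_flatMap, List.filter_map, List.map_flatMap,
        List.nil_append]
      apply List.flatMap_congr
      intro v _
      rw [ih]
      simp [Function.comp_def, coverFold, List.map_map, List.append_assoc]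
      try rfl

theorem enumerate_comp_surjections_eq_filter (n p : Int) :
    enumerate_comp_surjections n p =
      (prodRepeat p (pyGetComplementPairs n).length).filter
        (fun vs => decide (PySem.Set.len (coverFold p PySem.Set.empty vs) = p)) := by
  have h : enumerate_comp_surjections n p =
      (prodRepeat p (pyGetComplementPairs n).length).foldl
        (fun surjections vals =>
          if PySem.Set.len (coverFold p PySem.Set.empty vals) = p then surjections ++ [vals]
          else surjections) [] := rfl
  rw [h, PySem.List.foldl_append_ite_eq_filter
    (fun vs => PySem.Set.len (coverFold p PySem.Set.empty vs) = p)]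
  simp

-- ===== VERDICT (by name: the statement is the Claim_ definition above) =====
theorem enumerate_comp_surjections_spec : Claim_equal_enumerate_comp_surjections := by
  intro n p _ _
  unfold Spec_enumerate_comp_surjections
  rw [enumerate_comp_surjections_eq_filter]
  show _ = dfsCover p (pyGetComplementPairs n).length PySem.Set.empty []
  rw [dfsCover_eq]
  simp
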